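-- pv_equiv track=rewrite | github.com/sigurdvaa/adventofcode | 2018/17-Reservoir-Research.py | check_flow_side
-- ===== SOURCE A (Python) =====
-- def check_flow_side(flow, clay, reached, step):
--     next_flow = (flow[0] + step, flow[1])
--     if next_flow in clay:
--         return True
--     if next_flow in reached:
--         return check_flow_side(next_flow, clay, reached, step)
--
--     down_flow = (flow[0], flow[1] + 1)
--     if down_flow in reached:
--         return False
--     return True
-- ===== SOURCE B (Python) =====
-- def check_flow_side(flow, clay, reached, step):
--     x, y = flow[0], flow[1]
--     row_clay = {c[0] for c in clay if len(c) == 2 and c[1] == y}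
--     row_reached = {r[0] for r in reached if len(r) == 2 and r[1] == y}
--     below = {r[0] for r in reached if len(r) == 2 and r[1] == y + 1}
--     while True:
--         nx = x + step
--         if nx in row_clay:
--             return True
--         if nx not in row_reached:
--             return x not in below
--         x = nx
-- ===== Notes on version B (the rewrite author's own statement) =====
-- stated objective: alternative
-- what changed: Replaces the tail recursion that tests full (x,y) pairs against clay/reached at every cell with one upfront pass projecting the three relevant rows to sets of x-coordinates, followed by a plain while loop over x with y fixed.
import Mathlib
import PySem

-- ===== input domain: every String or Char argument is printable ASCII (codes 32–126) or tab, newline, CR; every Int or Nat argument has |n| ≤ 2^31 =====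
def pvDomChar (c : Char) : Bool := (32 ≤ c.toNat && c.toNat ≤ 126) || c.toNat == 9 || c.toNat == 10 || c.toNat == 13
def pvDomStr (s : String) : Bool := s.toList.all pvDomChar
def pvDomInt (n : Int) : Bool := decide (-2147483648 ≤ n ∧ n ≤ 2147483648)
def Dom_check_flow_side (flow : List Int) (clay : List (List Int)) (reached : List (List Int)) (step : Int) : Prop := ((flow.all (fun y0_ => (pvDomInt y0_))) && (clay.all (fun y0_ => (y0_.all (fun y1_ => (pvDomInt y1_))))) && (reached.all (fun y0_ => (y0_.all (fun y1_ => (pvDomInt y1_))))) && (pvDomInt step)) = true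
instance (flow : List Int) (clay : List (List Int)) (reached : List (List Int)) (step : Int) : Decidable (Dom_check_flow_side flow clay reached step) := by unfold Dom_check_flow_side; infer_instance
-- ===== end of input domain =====

-- B replaces A's tail recursion over (x,y) pairs with precomputed per-row
-- x-coordinate sets plus a plain while loop over x (alternative decomposition).


-- ===== PORT A =====
-- A's tail recursion, with fuel only to make it total; under Pre_ the fuel
-- (reached.length + 1) is never exhausted (each recursive call visits a fresh
-- member of `reached`), so `none` never arises inside Pre_.
def chkA (clay reached : List (List Int)) (step : Int) : Nat → List Int → Option Bool
  | 0, _ => none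
  | fuel + 1, flow =>
    match PySem.List.pyGet? flow 0, PySem.List.pyGet? flow 1 with
    | some x, some y =>
      let next_flow := [x + step, y]
      if next_flow ∈ clay then some true
      else if next_flow ∈ reached then chkA clay reached step fuel next_flow
      else if [x, y + 1] ∈ reached then some false
      else some true
    | _, _ => none

def check_flow_side (flow : List Int) (clay : List (List Int)) (reached : List (List Int)) (step : Int) : Option Bool :=
  chkA clay reached step (reached.length + 1) flow

-- ===== PORT B =====
-- {c[0] for c in cells if len(c) == 2 and c[1] == y}
def rowXs (cells : List (List Int)) (y : Int) : PySem.Set Int :=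
  PySem.Set.ofList (cells.filterMap (fun c =>
    match c with
    | [a, b] => if b = y then some a else none
    | _ => none))

-- the while loop of B (fuel makes it total, same bound as A's port)
def walkB (rowClay rowReached below : PySem.Set Int) (step : Int) : Nat → Int → Option Bool
  | 0, _ => none
  | fuel + 1, x =>
    let nx := x + step
    if nx ∈ rowClay then some true
    else if nx ∉ rowReached then some (decide (x ∉ below))
    else walkB rowClay rowReached below step fuel nx

def check_flow_side_alt (flow : List Int) (clay : List (List Int)) (reached : List (List Int)) (step : Int) : Option Bool :=
  match PySem.List.pyGet? flow 0, PySem.List.pyGet? flow 1 with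
  | some x, some y =>
      walkB (rowXs clay y) (rowXs reached y) (rowXs reached (y + 1)) step (reached.length + 1) x
  | _, _ => none

-- ===== PRECONDITION & SPEC =====
-- Pre_ excludes inputs on which Python A raises: flow shorter than 2 (IndexError
-- on flow[1]) and step = 0 with (flow[0], flow[1]) in reached but not in clay
-- (infinite self-recursion, RecursionError).
def Pre_check_flow_side (flow : List Int) (clay : List (List Int)) (reached : List (List Int)) (step : Int) : Prop :=
  2 ≤ flow.length ∧
  (step = 0 → [PySem.List.pyGetD flow 0 0, PySem.List.pyGetD flow 1 0] ∈ clay ∨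
              [PySem.List.pyGetD flow 0 0, PySem.List.pyGetD flow 1 0] ∉ reached)
instance (flow : List Int) (clay : List (List Int)) (reached : List (List Int)) (step : Int) : Decidable (Pre_check_flow_side flow clay reached step) := by unfold Pre_check_flow_side; infer_instance

def pvWitness_check_flow_side : List Int × List (List Int) × List (List Int) × Int :=
  ([3, 5], [[6, 5]], [[4, 5], [5, 5], [3, 6]], 1)

def Spec_check_flow_side (flow : List Int) (clay : List (List Int)) (reached : List (List Int)) (step : Int) (out : Option Bool) : Prop := out = check_flow_side_alt flow clay reached step
instance (flow : List Int) (clay : List (List Int)) (reached : List (List Int)) (step : Int) (out : Option Bool) : Decidable (Spec_check_flow_side flow clay reached step out) := by unfold Spec_check_flow_side; infer_instance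

-- ===== CLAIM (what is proved, stated in full; the proofs are below) =====
def Claim_equal_check_flow_side : Prop := ∀ (flow : List Int) (clay : List (List Int)) (reached : List (List Int)) (step : Int), Dom_check_flow_side flow clay reached step → Pre_check_flow_side flow clay reached step → Spec_check_flow_side flow clay reached step (check_flow_side flow clay reached step)

-- ===== LEMMAS AND PROOFS =====

-- membership in a per-row set = membership of the pair in the cell list
lemma mem_rowXs (cells : List (List Int)) (y a : Int) :
    a ∈ rowXs cells y ↔ [a, y] ∈ cells := by
  unfold rowXs
  rw [PySem.Set.mem_ofList, List.mem_filterMap]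
  constructor
  · rintro ⟨c, hc, hf⟩
    match c with
    | [] => simp at hf
    | [_] => simp at hf
    | [a', b'] =>
      by_cases hb : b' = y
      · simp [hb] at hf; subst hf; subst hb; exact hc
      · simp [hb] at hf
    | _ :: _ :: _ :: _ => simp at hf
  · intro h
    exact ⟨[a, y], h, by simp⟩

-- the loop of B computes exactly A's recursion on a length-2 flow, for every fuel
lemma walk_eq_chkA (clay reached : List (List Int)) (step y : Int) :
    ∀ (fuel : Nat) (x : Int),
      walkB (rowXs clay y) (rowXs reached y) (rowXs reached (y + 1)) step fuel x
        = chkA clay reached step fuel [x, y] := by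
  intro fuel
  induction fuel with
  | zero => intro x; simp [walkB, chkA]
  | succ f ih =>
    intro x
    rw [walkB, chkA]
    simp only [PySem.List.pyGet?, PySem.List.pyIdx?]
    norm_num
    by_cases hc : [x + step, y] ∈ clay
    · simp [hc, (mem_rowXs clay y (x + step)).mpr hc]
    · have hc' : x + step ∉ rowXs clay y := fun h => hc ((mem_rowXs clay y (x + step)).mp h)
      by_cases hr : [x + step, y] ∈ reached
      · simp [hc, hc', hr, (mem_rowXs reached y (x + step)).mpr hr, ih]
      · have hr' : x + step ∉ rowXs reached y := fun h => hr ((mem_rowXs reached y (x + step)).mp h)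
        by_cases hd : [x, y + 1] ∈ reached
        · simp [hc, hc', hr, hr', hd, (mem_rowXs reached (y + 1) x).mpr hd]
        · have hd' : x ∉ rowXs reached (y + 1) := fun h => hd ((mem_rowXs reached (y + 1) x).mp h)
          simp [hc, hc', hr, hr', hd, hd']

-- the first step of A's recursion only looks at flow[0] and flow[1]
lemma chkA_two (clay reached : List (List Int)) (step : Int) (fuel : Nat)
    (flow : List Int) (x y : Int)
    (h0 : PySem.List.pyGet? flow 0 = some x) (h1 : PySem.List.pyGet? flow 1 = some y) :
    chkA clay reached step (fuel + 1) flow = chkA clay reached step (fuel + 1) [x, y] := by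
  rw [chkA, chkA, h0, h1]
  simp [PySem.List.pyGet?, PySem.List.pyIdx?]

-- ===== VERDICT (by name: the statement is the Claim_ definition above) =====
theorem check_flow_side_spec : Claim_equal_check_flow_side := by
  intro flow clay reached step _ hpre
  unfold Spec_check_flow_side check_flow_side check_flow_side_alt
  obtain ⟨hlen, _⟩ := hpre
  match flow, hlen with
  | a :: b :: t, _ =>
    have hx : PySem.List.pyGet? (a :: b :: t) 0 = some a := PySem.List.pyGet?_zero_cons _ _
    have hy : PySem.List.pyGet? (a :: b :: t) 1 = some b := by
      simpa using PySem.List.pyGet?_natCast (a :: b :: t) 1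
    rw [hx, hy]
    dsimp only
    rw [chkA_two clay reached step reached.length _ a b hx hy, walk_eq_chkA]
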